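-- pv_equiv track=rewrite | github.com/harjassand/AGI-Stack-Unchained | scripts/run_long_disciplined_loop_v1.py | _canonical_axis_gate_relpaths
-- ===== SOURCE A (Python) =====
-- from typing import Any
--
-- def _canonical_axis_gate_relpath(path_value: Any) -> str:
--     raw = str(path_value).strip().replace("\\", "/")
--     parts: list[str] = []
--     for token in raw.split("/"):
--         part = str(token).strip()
--         if not part or part == ".":
--             continue
--         if part == "..":
--             return ""
--         parts.append(part)
--     if not parts:
--         return ""
--     return "/".join(parts)
--
-- def _canonical_axis_gate_relpaths(rows: Any) -> list[str]:
--     if not isinstance(rows, list):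
--         return []
--     out: list[str] = []
--     seen: set[str] = set()
--     for row in rows:
--         rel = _canonical_axis_gate_relpath(row)
--         if not rel:
--             continue
--         if rel not in seen:
--             out.append(rel)
--             seen.add(rel)
--     return sorted(out)
-- ===== SOURCE B (Python) =====
-- from typing import Any
--
-- def _canonical_axis_gate_relpath(path_value: Any) -> str:
--     raw = str(path_value).strip().replace("\\", "/")
--     parts: list[str] = []
--     for token in raw.split("/"):
--         part = str(token).strip()
--         if not part or part == ".":
--             continue
--         if part == "..":
--             return ""
--         parts.append(part)
--     if not parts:
--         return ""
--     return "/".join(parts)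
--
-- def _canonical_axis_gate_relpaths(rows: Any) -> list[str]:
--     if not isinstance(rows, list):
--         return []
--     flat: list[str] = []
--     for row in rows:
--         rel = _canonical_axis_gate_relpath(row)
--         if rel:
--             flat.append(rel)
--     flat.sort()
--     out: list[str] = []
--     prev = None
--     for rel in flat:
--         if rel != prev:
--             out.append(rel)
--             prev = rel
--     return out
-- ===== Notes on version B (the rewrite author's own statement) =====
-- stated objective: alternative
-- what changed: B collects all non-empty canonical paths into a flat list with no set and no dedup during the loop, sorts it, and deduplicates by a single adjacency pass over the sorted list (compare each element with the previously emitted one), instead of A's hash-set membership dedup before sorting.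
import Mathlib
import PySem

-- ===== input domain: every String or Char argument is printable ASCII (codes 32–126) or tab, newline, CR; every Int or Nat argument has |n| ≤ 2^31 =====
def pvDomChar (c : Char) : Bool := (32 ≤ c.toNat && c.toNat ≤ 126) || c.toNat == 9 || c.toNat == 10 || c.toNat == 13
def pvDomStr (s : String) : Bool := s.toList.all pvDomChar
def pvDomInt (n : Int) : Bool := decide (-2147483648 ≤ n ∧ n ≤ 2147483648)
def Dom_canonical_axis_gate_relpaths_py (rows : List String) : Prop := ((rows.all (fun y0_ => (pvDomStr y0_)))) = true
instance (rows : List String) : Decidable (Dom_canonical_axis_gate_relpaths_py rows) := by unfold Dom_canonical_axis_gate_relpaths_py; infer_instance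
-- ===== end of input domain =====

-- B replaces A's hash-set dedup-before-sort by flatten → sort → adjacency-dedup pass (alternative decomposition, same cost).


-- ===== PORT A =====
-- helper: the inner loop of _canonical_axis_gate_relpath (early 'return ""' on ".." becomes the 'none' result)
def canonical_axis_gate_relpath_collect (parts : List String) (toks : List String) : Option (List String) :=
  match toks with
  | [] => some parts
  | tok :: rest =>
    let part := PySem.Str.strip tok
    if part = "" ∨ part = "." then canonical_axis_gate_relpath_collect parts rest
    else if part = ".." then none
    else canonical_axis_gate_relpath_collect (parts ++ [part]) rest

def canonical_axis_gate_relpath (path_value : String) : String :=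
  let raw := PySem.Str.replace (PySem.Str.strip path_value) "\\" "/"
  -- raw.split("/"): sep ≠ "", so PySem.Str.split? is always `some`; .getD [] only totalizes it
  match canonical_axis_gate_relpath_collect [] ((PySem.Str.split? raw "/").getD []) with
  | none => ""
  | some parts => if parts = [] then "" else PySem.Str.join "/" parts

def canonical_axis_gate_relpaths_py (rows : List String) : List String :=
  let st := rows.foldl
    (fun (st : List String × PySem.Set String) row =>
      let rel := canonical_axis_gate_relpath row
      if rel = "" then st
      else if PySem.Set.contains st.2 rel then st
      else (st.1 ++ [rel], PySem.Set.add st.2 rel))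
    ([], PySem.Set.empty)
  PySem.List.sorted st.1 (fun x => x) false

-- ===== PORT B =====
def canonical_axis_gate_relpaths_py_alt (rows : List String) : List String :=
  let flat := rows.foldl
    (fun acc row =>
      let rel := canonical_axis_gate_relpath row
      if rel = "" then acc else acc ++ [rel]) []
  let ys := PySem.List.sorted flat (fun x => x) false
  (ys.foldl
    (fun (st : List String × Option String) rel =>
      if some rel = st.2 then st else (st.1 ++ [rel], some rel))
    ([], none)).1

-- ===== PRECONDITION & SPEC =====
def Spec_canonical_axis_gate_relpaths_py (rows : List String) (out : List String) : Prop := out = canonical_axis_gate_relpaths_py_alt rows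
instance (rows : List String) (out : List String) : Decidable (Spec_canonical_axis_gate_relpaths_py rows out) := by unfold Spec_canonical_axis_gate_relpaths_py; infer_instance

-- ===== CLAIM (what is proved, stated in full; the proofs are below) =====
def Claim_equal_canonical_axis_gate_relpaths_py : Prop := ∀ (rows : List String), Dom_canonical_axis_gate_relpaths_py rows → Spec_canonical_axis_gate_relpaths_py rows (canonical_axis_gate_relpaths_py rows)

-- ===== LEMMAS AND PROOFS =====
-- the list of non-empty canonical relpaths of rows, in order
def pvRels : List String → List String
  | [] => []
  | row :: t =>
    let rel := canonical_axis_gate_relpath row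
    if rel = "" then pvRels t else rel :: pvRels t

-- adjacency dedup with a 'previous element' register (B's second loop)
def pvAdj : Option String → List String → List String
  | _, [] => []
  | prev, x :: t => if some x = prev then pvAdj prev t else x :: pvAdj (some x) t

theorem fold_flat (rows : List String) : ∀ acc : List String,
    rows.foldl (fun acc row =>
      let rel := canonical_axis_gate_relpath row
      if rel = "" then acc else acc ++ [rel]) acc = acc ++ pvRels rows := by
  induction rows with
  | nil => intro acc; simp [pvRels]
  | cons row t ih =>
    intro acc
    simp only [List.foldl, pvRels]
    by_cases h : canonical_axis_gate_relpath row = "" <;> simp [h, ih]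

theorem fold_A (rows : List String) : ∀ s : List String,
    rows.foldl (fun (st : List String × PySem.Set String) row =>
      let rel := canonical_axis_gate_relpath row
      if rel = "" then st
      else if PySem.Set.contains st.2 rel then st
      else (st.1 ++ [rel], PySem.Set.add st.2 rel)) (s, s)
    = (PySem.Set.update s (pvRels rows), PySem.Set.update s (pvRels rows)) := by
  induction rows with
  | nil => intro s; simp [pvRels, PySem.Set.update]
  | cons row t ih =>
    intro s
    by_cases h : canonical_axis_gate_relpath row = ""
    · have hstep : List.foldl (fun (st : List String × PySem.Set String) row =>
      let rel := canonical_axis_gate_relpath row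
      if rel = "" then st
      else if PySem.Set.contains st.2 rel then st
      else (st.1 ++ [rel], PySem.Set.add st.2 rel)) (s, s) (row :: t)
          = List.foldl (fun (st : List String × PySem.Set String) row =>
      let rel := canonical_axis_gate_relpath row
      if rel = "" then st
      else if PySem.Set.contains st.2 rel then st
      else (st.1 ++ [rel], PySem.Set.add st.2 rel)) (s, s) t := by
        simp [h]
      rw [hstep, ih s]
      simp [pvRels, h]
    · by_cases hm : canonical_axis_gate_relpath row ∈ s
      · have hstep : List.foldl (fun (st : List String × PySem.Set String) row =>
      let rel := canonical_axis_gate_relpath row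
      if rel = "" then st
      else if PySem.Set.contains st.2 rel then st
      else (st.1 ++ [rel], PySem.Set.add st.2 rel)) (s, s) (row :: t)
            = List.foldl (fun (st : List String × PySem.Set String) row =>
      let rel := canonical_axis_gate_relpath row
      if rel = "" then st
      else if PySem.Set.contains st.2 rel then st
      else (st.1 ++ [rel], PySem.Set.add st.2 rel)) (s, s) t := by
          simp [h, hm]
        have hadd : PySem.Set.add s (canonical_axis_gate_relpath row) = s := by
          simp [PySem.Set.add, hm]
        rw [hstep, ih s]
        simp [pvRels, h, PySem.Set.update, hadd]
      · have hstep : List.foldl (fun (st : List String × PySem.Set String) row =>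
      let rel := canonical_axis_gate_relpath row
      if rel = "" then st
      else if PySem.Set.contains st.2 rel then st
      else (st.1 ++ [rel], PySem.Set.add st.2 rel)) (s, s) (row :: t)
            = List.foldl (fun (st : List String × PySem.Set String) row =>
      let rel := canonical_axis_gate_relpath row
      if rel = "" then st
      else if PySem.Set.contains st.2 rel then st
      else (st.1 ++ [rel], PySem.Set.add st.2 rel))
              (s ++ [canonical_axis_gate_relpath row], s ++ [canonical_axis_gate_relpath row]) t := by
          simp [h, hm, PySem.Set.add]
        have hadd : PySem.Set.add s (canonical_axis_gate_relpath row)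
            = s ++ [canonical_axis_gate_relpath row] := by
          simp [PySem.Set.add, hm]
        rw [hstep, ih (s ++ [canonical_axis_gate_relpath row])]
        simp [pvRels, h, PySem.Set.update, hadd]

theorem fold_B (ys : List String) : ∀ (out : List String) (prev : Option String),
    (ys.foldl (fun (st : List String × Option String) rel =>
      if some rel = st.2 then st else (st.1 ++ [rel], some rel)) (out, prev)).1
    = out ++ pvAdj prev ys := by
  induction ys with
  | nil => intro out prev; simp [pvAdj]
  | cons x t ih =>
    intro out prev
    simp only [List.foldl, pvAdj]
    by_cases h : some x = prev <;> simp [h, ih]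

theorem pvAdj_subset : ∀ (ys : List String) (prev : Option String) (x : String),
    x ∈ pvAdj prev ys → x ∈ ys := by
  intro ys
  induction ys with
  | nil => intro prev x hx; simp [pvAdj] at hx
  | cons a t ih =>
    intro prev x hx
    by_cases h : some a = prev
    · simp [pvAdj, h] at hx
      exact List.mem_cons_of_mem _ (ih prev x hx)
    · simp [pvAdj, h] at hx
      rcases hx with hx | hx
      · simp [hx]
      · exact List.mem_cons_of_mem _ (ih (some a) x hx)

theorem mem_pvAdj : ∀ (ys : List String) (prev : Option String) (x : String),
    x ∈ ys → x ∈ pvAdj prev ys ∨ some x = prev := by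
  intro ys
  induction ys with
  | nil => intro prev x hx; simp at hx
  | cons a t ih =>
    intro prev x hx
    rcases List.mem_cons.1 hx with rfl | hx
    · by_cases h : some x = prev
      · right; exact h
      · left; simp [pvAdj, h]
    · by_cases h : some a = prev
      · simpa [pvAdj, h] using ih prev x hx
      · rcases ih (some a) x hx with hm | he
        · left; simp [pvAdj, h, hm]
        · left; simp at he; simp [pvAdj, h, he]

theorem pvAdj_strong : ∀ (ys : List String) (prev : Option String),
    ys.Pairwise (· ≤ ·) → (∀ p, prev = some p → ∀ y ∈ ys, p ≤ y) →
    (pvAdj prev ys).Pairwise (· < ·) ∧ (∀ p, prev = some p → ∀ z ∈ pvAdj prev ys, p < z) := by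
  intro ys
  induction ys with
  | nil => intro prev _ _; simp [pvAdj]
  | cons a t ih =>
    intro prev hp hb
    have hat : ∀ y ∈ t, a ≤ y := (List.pairwise_cons.1 hp).1
    have hpt : t.Pairwise (· ≤ ·) := (List.pairwise_cons.1 hp).2
    by_cases h : some a = prev
    · have hb' : ∀ p, prev = some p → ∀ y ∈ t, p ≤ y := by
        intro p hpv y hy
        have : p = a := by rw [hpv] at h; exact (Option.some_inj.1 h).symm ▸ rfl
        exact this ▸ hat y hy
      have := ih prev hpt hb'
      constructor
      · simpa [pvAdj, h] using this.1
      · intro p hpv z hz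
        simp [pvAdj, h] at hz
        exact this.2 p hpv z hz
    · have := ih (some a) hpt (by intro p hpv y hy; cases hpv; exact hat y hy)
      constructor
      · simp only [pvAdj, h]
        refine List.pairwise_cons.2 ⟨?_, this.1⟩
        intro z hz
        exact this.2 a rfl z hz
      · intro p hpv z hz
        have hpa : p ≤ a := hb p hpv a (by simp)
        have hpa' : p ≠ a := by
          intro he; exact h (by rw [hpv, he])
        have hplt : p < a := lt_of_le_of_ne hpa hpa'
        simp [pvAdj, h] at hz
        rcases hz with rfl | hz
        · exact hplt
        · exact lt_trans hplt (this.2 a rfl z hz)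

-- ===== VERDICT (by name: the statement is the Claim_ definition above) =====
theorem canonical_axis_gate_relpaths_py_spec : Claim_equal_canonical_axis_gate_relpaths_py := by
  intro rows _
  unfold Spec_canonical_axis_gate_relpaths_py
  simp only [canonical_axis_gate_relpaths_py, canonical_axis_gate_relpaths_py_alt]
  rw [show (PySem.Set.empty : PySem.Set String) = ([] : List String) from rfl]
  rw [fold_A rows [], fold_flat rows [], fold_B]
  simp only [List.nil_append]
  rw [PySem.Set.update_nil_left]
  set R := pvRels rows with hR
  set ws := PySem.List.sorted R (fun x => x) false with hws
  have hpw : ws.Pairwise (· ≤ ·) := by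
    simpa using PySem.List.sorted_pairwise (xs := R) (key := fun x => x)
  have hstrong := pvAdj_strong ws none hpw (by intro p hp; cases hp)
  apply PySem.List.sorted_eq_of_perm_of_pairwise_lt
  · -- (pvAdj none ws).Perm (Set.ofList R)
    apply (List.perm_ext_iff_of_nodup ?_ ?_).2
    · intro a
      constructor
      · intro ha
        have := pvAdj_subset ws none a ha
        rw [hws] at this
        have := (PySem.List.mem_sorted _ _ _ _).1 this
        simpa [PySem.Set.mem_ofList] using this
      · intro ha
        have haR : a ∈ R := by simpa [PySem.Set.mem_ofList] using ha
        have haws : a ∈ ws := by rw [hws]; exact (PySem.List.mem_sorted _ _ _ _).2 haR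
        rcases mem_pvAdj ws none a haws with hm | hm
        · exact hm
        · cases hm
    · exact (hstrong.1.imp (fun h => ne_of_lt h))
    · exact PySem.Set.nodup_ofList _
  · simpa using hstrong.1
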